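-- pv_equiv track=rewrite | github.com/DominikSzczepaniak/University | Semestr1/Wstęp do programowania Python/lista9/2.py | mozliwosci_laczen
-- ===== SOURCE A (Python) =====
-- def mozliwosci_laczen(n):
--     mozliwosci = []
--     for i in range(0, n+1):
--         for j in range(0, n+1):
--             for k in range(0, n+1):
--                 if(i + j + k == n):
--                     mozliwosci.append([i, j, k])
--     return mozliwosci
-- ===== SOURCE B (Python) =====
-- def mozliwosci_laczen(n):
--     # O(n^2): k is forced to be n - i - j, so list it by comprehension
--     return [[i, j, n - i - j] for i in range(n + 1) for j in range(n - i + 1)]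
-- ===== Notes on version B (the rewrite author's own statement) =====
-- stated objective: faster
-- what changed: B replaces A's accumulator loops with a single comprehension over i and j (j capped at n-i) that computes k = n-i-j directly, removing the innermost scan and the membership test: O(n^2) comprehension instead of A's O(n^3) triple loop with conditional appends.
import Mathlib
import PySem

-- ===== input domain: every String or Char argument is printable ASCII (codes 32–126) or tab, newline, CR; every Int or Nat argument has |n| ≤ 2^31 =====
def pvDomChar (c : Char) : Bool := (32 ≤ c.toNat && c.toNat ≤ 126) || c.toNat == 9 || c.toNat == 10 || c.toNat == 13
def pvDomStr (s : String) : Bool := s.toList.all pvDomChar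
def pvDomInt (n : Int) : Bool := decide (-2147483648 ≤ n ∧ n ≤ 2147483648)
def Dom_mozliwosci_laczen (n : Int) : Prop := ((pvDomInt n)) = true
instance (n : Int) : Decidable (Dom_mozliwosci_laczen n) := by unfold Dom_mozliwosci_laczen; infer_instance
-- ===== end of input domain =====

-- B lists the triples by a comprehension over i and j with k = n-i-j computed directly: O(n^2) instead of A's O(n^3) filtered triple loop.

-- ===== PORT A =====
def mozliwosci_laczen (n : Int) : List (List Int) :=
  (PySem.List.pyRange 0 (n + 1) 1).foldl (fun acc i =>
    (PySem.List.pyRange 0 (n + 1) 1).foldl (fun acc j =>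
      (PySem.List.pyRange 0 (n + 1) 1).foldl (fun acc k =>
        if i + j + k == n then acc ++ [[i, j, k]] else acc) acc) acc) []

-- ===== PORT B =====
def mozliwosci_laczen_alt (n : Int) : List (List Int) :=
  (PySem.List.pyRange 0 (n + 1) 1).flatMap (fun i =>
    (PySem.List.pyRange 0 (n - i + 1) 1).map (fun j => [i, j, n - i - j]))

-- ===== PRECONDITION & SPEC =====
def Spec_mozliwosci_laczen (n : Int) (out : List (List Int)) : Prop := out = mozliwosci_laczen_alt n
instance (n : Int) (out : List (List Int)) : Decidable (Spec_mozliwosci_laczen n out) := by unfold Spec_mozliwosci_laczen; infer_instance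

-- ===== CLAIM (what is proved, stated in full; the proofs are below) =====
def Claim_equal_mozliwosci_laczen : Prop := ∀ (n : Int), Dom_mozliwosci_laczen n → Spec_mozliwosci_laczen n (mozliwosci_laczen n)

-- ===== LEMMAS AND PROOFS =====

theorem pv_flatMap_eq_map_of {α β : Type} (l : List α) (g : α → List β) (f : α → β)
    (h : ∀ x ∈ l, g x = [f x]) : l.flatMap g = l.map f := by
  induction l with
  | nil => rfl
  | cons a t ih =>
    simp only [List.flatMap_cons, List.map_cons, h a (List.mem_cons_self),
      ih (fun x hx => h x (List.mem_cons_of_mem a hx))]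
    rfl

theorem pv_flatMap_eq_nil_of {α β : Type} (l : List α) (g : α → List β)
    (h : ∀ x ∈ l, g x = []) : l.flatMap g = [] := by
  induction l with
  | nil => rfl
  | cons a t ih =>
    simp only [List.flatMap_cons, h a (List.mem_cons_self),
      ih (fun x hx => h x (List.mem_cons_of_mem a hx)), List.nil_append]

-- A's innermost k-loop contributes [i,j,n-i-j] exactly when that k lies in the range, else nothing.
theorem pv_kloop (n i j : Int) (acc : List (List Int)) :
    (PySem.List.pyRange 0 (n + 1) 1).foldl (fun acc k =>
        if i + j + k == n then acc ++ [[i, j, k]] else acc) acc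
      = acc ++ (if 0 ≤ n - i - j ∧ n - i - j < n + 1 then [[i, j, n - i - j]] else []) := by
  rw [PySem.List.foldl_append_if]
  congr 1
  by_cases h : 0 ≤ n - i - j ∧ n - i - j < n + 1
  · rw [if_pos h]
    rw [PySem.List.pyRange_one_append 0 (n - i - j + 1) (n + 1) (by omega) (by omega),
      PySem.List.pyRange_one_append 0 (n - i - j) (n - i - j + 1) (by omega) (by omega),
      List.filter_append, List.filter_append]
    rw [List.filter_eq_nil_iff.mpr (by
      intro k hk
      have := PySem.List.mem_pyRange_one.mp hk
      simp only [beq_iff_eq]; omega)]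
    rw [(List.filter_eq_nil_iff (l := PySem.List.pyRange (n - i - j + 1) (n + 1) 1)).mpr (by
      intro k hk
      have := PySem.List.mem_pyRange_one.mp hk
      simp only [beq_iff_eq]; omega)]
    rw [PySem.List.pyRange_one_singleton]
    simp only [List.nil_append, List.append_nil, List.filter_cons, List.filter_nil]
    rw [if_pos (by simp only [beq_iff_eq]; omega)]
    simp
  · rw [if_neg h]
    rw [List.filter_eq_nil_iff.mpr (by
      intro k hk
      have := PySem.List.mem_pyRange_one.mp hk
      simp only [beq_iff_eq]; omega)]
    rfl

-- For 0 ≤ i < n+1, A's j-loop over 0..n contributes exactly B's comprehension row for i.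
theorem pv_jloop (n i : Int) (hi : 0 ≤ i) (hi2 : i < n + 1) (acc : List (List Int)) :
    (PySem.List.pyRange 0 (n + 1) 1).foldl (fun acc j =>
        (PySem.List.pyRange 0 (n + 1) 1).foldl (fun acc k =>
          if i + j + k == n then acc ++ [[i, j, k]] else acc) acc) acc
      = acc ++ (PySem.List.pyRange 0 (n - i + 1) 1).map (fun j => [i, j, n - i - j]) := by
  rw [PySem.List.foldl_congr_mem _ _
      (fun acc j => acc ++ (if 0 ≤ n - i - j ∧ n - i - j < n + 1 then [[i, j, n - i - j]] else []))
      acc (fun acc j _ => pv_kloop n i j acc)]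
  rw [PySem.List.foldl_append_eq_flatMap]
  congr 1
  rw [PySem.List.pyRange_one_append 0 (n - i + 1) (n + 1) (by omega) (by omega),
    List.flatMap_append]
  rw [pv_flatMap_eq_nil_of (PySem.List.pyRange (n - i + 1) (n + 1) 1) _ (by
    intro j hj
    have := PySem.List.mem_pyRange_one.mp hj
    rw [if_neg (by omega)])]
  rw [List.append_nil]
  exact pv_flatMap_eq_map_of _ _ _ (by
    intro j hj
    have := PySem.List.mem_pyRange_one.mp hj
    rw [if_pos (by omega)])

-- ===== VERDICT (by name: the statement is the Claim_ definition above) =====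
theorem mozliwosci_laczen_spec : Claim_equal_mozliwosci_laczen := by
  intro n _
  unfold Spec_mozliwosci_laczen mozliwosci_laczen mozliwosci_laczen_alt
  rw [PySem.List.foldl_congr_mem _ _
      (fun acc i => acc ++ (PySem.List.pyRange 0 (n - i + 1) 1).map (fun j => [i, j, n - i - j]))
      [] (fun acc i hi => by
        have := PySem.List.mem_pyRange_one.mp hi
        exact pv_jloop n i this.1 this.2 acc)]
  rw [PySem.List.foldl_append_eq_flatMap]
  rfl
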